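-- pv_equiv track=rewrite | github.com/houlianpi/fsq-mac | src/fsq_mac/adapters/appium_mac2.py | _quote_xpath_literal
-- ===== SOURCE A (Python) =====
-- def _quote_xpath_literal(value: str) -> str:
--     if "'" not in value:
--         return f"'{value}'"
--     if '"' not in value:
--         return f'"{value}"'
--     parts = value.split("'")
--     quoted = []
--     for i, part in enumerate(parts):
--         if part:
--             quoted.append(f"'{part}'")
--         if i != len(parts) - 1:
--             quoted.append('"\'"')
--     return "concat(" + ", ".join(quoted) + ")"
-- ===== SOURCE B (Python) =====
-- def _quote_xpath_literal(value: str) -> str: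
--     if "'" not in value:
--         return f"'{value}'"
--     if '"' not in value:
--         return f'"{value}"'
--     tokens = []
--     buf = ""
--     for ch in value:
--         if ch != "'":
--             buf += ch
--         else:
--             if buf:
--                 tokens.append(f"'{buf}'")
--             tokens.append('"\'"')
--             buf = ""
--     if buf:
--         tokens.append(f"'{buf}'")
--     return "concat(" + ", ".join(tokens) + ")"
-- ===== Notes on version B (the rewrite author's own statement) =====
-- stated objective: alternative
-- what changed: The mixed-quote case replaces split-on-quote plus an enumerate loop with last-index bookkeeping by a single left-to-right character scan that maintains a buffer, flushing it as a quoted token at each single-quote character and emitting the separator token immediately.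
import Mathlib
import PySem

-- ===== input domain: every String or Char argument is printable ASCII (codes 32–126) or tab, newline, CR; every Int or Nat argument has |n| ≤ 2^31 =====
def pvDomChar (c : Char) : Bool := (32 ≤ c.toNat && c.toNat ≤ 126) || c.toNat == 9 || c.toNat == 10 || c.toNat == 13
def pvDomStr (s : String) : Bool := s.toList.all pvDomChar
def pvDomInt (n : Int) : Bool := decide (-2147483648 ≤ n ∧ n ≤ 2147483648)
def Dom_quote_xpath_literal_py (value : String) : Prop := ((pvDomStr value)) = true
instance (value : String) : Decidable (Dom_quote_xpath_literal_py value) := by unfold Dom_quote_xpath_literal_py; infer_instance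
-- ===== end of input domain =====

-- B replaces A's split-then-enumerate loop by a one-pass character scan with a buffer (same cost, different decomposition).

-- ===== PORT A =====
-- A's per-iteration body: append 'part' if non-empty, append "\"'\"" if not the last index.
def pvAStep (lastIdx : Int) (q : List (List Char)) (ip : Int × List Char) : List (List Char) :=
  let q1 := if ip.2 ≠ [] then q ++ ['\'' :: ip.2 ++ ['\'']] else q
  if ip.1 ≠ lastIdx then q1 ++ [['"', '\'', '"']] else q1

def quote_xpath_literal_py (value : String) : String :=
  if PySem.Str.isIn "'" value ≠ true then
    String.ofList ('\'' :: value.toList ++ ['\''])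
  else if PySem.Str.isIn "\"" value ≠ true then
    String.ofList ('"' :: value.toList ++ ['"'])
  else
    let parts := PySem.Chars.splitOn value.toList ['\'']
    let quoted := (PySem.List.enumerate parts 0).foldl (pvAStep ((parts.length : Int) - 1)) []
    String.ofList ("concat(".toList ++ PySem.Chars.join ", ".toList quoted ++ [')'])

-- ===== PORT B =====
-- B's per-character step on the state (tokens, buffer).
def pvBStep (st : List (List Char) × List Char) (c : Char) : List (List Char) × List Char :=
  if c ≠ '\'' then (st.1, st.2 ++ [c])
  else ((if st.2 ≠ [] then st.1 ++ ['\'' :: st.2 ++ ['\'']] else st.1) ++ [['"', '\'', '"']], [])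

def pvBFlush (st : List (List Char) × List Char) : List (List Char) :=
  if st.2 ≠ [] then st.1 ++ ['\'' :: st.2 ++ ['\'']] else st.1

def quote_xpath_literal_py_alt (value : String) : String :=
  if PySem.Str.isIn "'" value ≠ true then
    String.ofList ('\'' :: value.toList ++ ['\''])
  else if PySem.Str.isIn "\"" value ≠ true then
    String.ofList ('"' :: value.toList ++ ['"'])
  else
    let tokens := pvBFlush (value.toList.foldl pvBStep ([], []))
    String.ofList ("concat(".toList ++ PySem.Chars.join ", ".toList tokens ++ [')'])

-- ===== PRECONDITION & SPEC =====
def Spec_quote_xpath_literal_py (value : String) (out : String) : Prop := out = quote_xpath_literal_py_alt value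
instance (value : String) (out : String) : Decidable (Spec_quote_xpath_literal_py value out) := by unfold Spec_quote_xpath_literal_py; infer_instance

-- ===== CLAIM (what is proved, stated in full; the proofs are below) =====
def Claim_equal_quote_xpath_literal_py : Prop := ∀ (value : String), Dom_quote_xpath_literal_py value → Spec_quote_xpath_literal_py value (quote_xpath_literal_py value)

-- ===== LEMMAS AND PROOFS =====

-- Structural split of a char list at every occurrence of the single separator char q.
def pvSq (q : Char) : List Char → List (List Char)
  | [] => [[]]
  | c :: l => if c = q then [] :: pvSq q l else (pvSq q l).modifyHead (c :: ·)

-- The common token list both loops produce: 'part' for each non-empty part, the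
-- separator token between consecutive parts.
def pvTok : List (List Char) → List (List Char)
  | [] => []
  | [p] => if p ≠ [] then ['\'' :: p ++ ['\'']] else []
  | p :: p2 :: ps =>
      (if p ≠ [] then ['\'' :: p ++ ['\'']] else []) ++ ['"', '\'', '"'] :: pvTok (p2 :: ps)

theorem pvSq_ne_nil (q : Char) (l : List Char) : pvSq q l ≠ [] := by
  induction l with
  | nil => simp [pvSq]
  | cons c l ih =>
    simp only [pvSq]
    split
    · simp
    · cases h : pvSq q l with
      | nil => exact absurd h ih
      | cons a t => simp [List.modifyHead]

theorem pvSplitOn_go_eq (q : Char) (l : List Char) : ∀ (fuel : Nat) (cur : List Char)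
    (acc : List (List Char)), l.length < fuel →
    PySem.Chars.splitOn.go [q] fuel l cur acc
      = acc.reverse ++ (pvSq q l).modifyHead (cur.reverse ++ ·) := by
  induction l with
  | nil =>
    intro fuel cur acc hf
    match fuel, hf with
    | fuel + 1, _ => simp [PySem.Chars.splitOn.go, pvSq, List.modifyHead]
  | cons c l ih =>
    intro fuel cur acc hf
    match fuel, hf with
    | fuel + 1, hf =>
      rw [PySem.Chars.splitOn.go]
      by_cases hc : c = q
      · subst hc
        have hpre : [c].isPrefixOf (c :: l) = true := by simp [List.isPrefixOf]
        rw [hpre, if_pos rfl]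
        have hdrop : List.drop [c].length (c :: l) = l := by simp
        rw [hdrop, ih fuel [] (cur.reverse :: acc) (by simpa using Nat.lt_of_succ_lt_succ hf)]
        have h0 : (pvSq c l).modifyHead (List.reverse [] ++ ·) = pvSq c l := by
          cases pvSq c l <;> simp [List.modifyHead]
        rw [h0]
        simp [pvSq, List.modifyHead]
      · have hpre : [q].isPrefixOf (c :: l) = false := by
          simp [List.isPrefixOf]
          exact fun h => absurd h.symm hc
        rw [hpre]
        simp only [Bool.false_eq_true, if_neg, not_false_eq_true]
        rw [ih fuel (c :: cur) acc (by simpa using Nat.lt_of_succ_lt_succ hf)]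
        cases hsq : pvSq q l with
        | nil => exact absurd hsq (pvSq_ne_nil q l)
        | cons a t =>
          simp [pvSq, if_neg hc, hsq, List.modifyHead]

theorem pvSplitOn_single (q : Char) (l : List Char) :
    PySem.Chars.splitOn l [q] = pvSq q l := by
  rw [PySem.Chars.splitOn, pvSplitOn_go_eq q l (l.length + 1) [] [] (by omega)]
  cases h : pvSq q l with
  | nil => exact absurd h (pvSq_ne_nil q l)
  | cons a t => simp [List.modifyHead]

-- A's enumerate loop, with an arbitrary start index and last-index bound.
def pvTokList (last : Int) : List (List Char) → Int → List (List Char)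
  | [], _ => []
  | p :: ps, s =>
      ((if p ≠ [] then ['\'' :: p ++ ['\'']] else []) ++
        if s ≠ last then [['"', '\'', '"']] else []) ++ pvTokList last ps (s + 1)

theorem pvA_loop_eq (last : Int) (ps : List (List Char)) : ∀ (s : Int) (q : List (List Char)),
    (PySem.List.enumerate ps s).foldl (pvAStep last) q = q ++ pvTokList last ps s := by
  induction ps with
  | nil => intro s q; simp [PySem.List.enumerate_nil, pvTokList]
  | cons p ps ih =>
    intro s q
    rw [PySem.List.enumerate_cons, List.foldl_cons, ih]
    simp only [pvAStep, pvTokList]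
    split_ifs <;> simp

theorem pvTokList_eq_pvTok (ps : List (List Char)) : ∀ (s : Int),
    pvTokList (s + ps.length - 1) ps s = pvTok ps := by
  induction ps with
  | nil => intro s; simp [pvTokList, pvTok]
  | cons p ps ih =>
    intro s
    cases ps with
    | nil => simp [pvTokList, pvTok]
    | cons p2 ps' =>
      have hlast : s ≠ s + ((p :: p2 :: ps').length : Int) - 1 := by
        simp only [List.length_cons]; push_cast; omega
      have harg : s + ((p :: p2 :: ps').length : Int) - 1
          = (s + 1) + ((p2 :: ps').length : Int) - 1 := by
        simp only [List.length_cons]; push_cast; omega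
      have hunf : pvTokList (s + ((p :: p2 :: ps').length : Int) - 1) (p :: p2 :: ps') s
          = ((if p ≠ [] then ['\'' :: p ++ ['\'']] else []) ++
              if s ≠ s + ((p :: p2 :: ps').length : Int) - 1 then [['"', '\'', '"']] else []) ++
            pvTokList (s + ((p :: p2 :: ps').length : Int) - 1) (p2 :: ps') (s + 1) := rfl
      rw [hunf, if_pos hlast, harg, ih (s + 1)]
      have htok : pvTok (p :: p2 :: ps')
          = (if p ≠ [] then ['\'' :: p ++ ['\'']] else []) ++ ['"', '\'', '"'] :: pvTok (p2 :: ps') := rfl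
      rw [htok]
      simp

-- B's scan, related to the structural split of (buffer ++ rest of input).
theorem pvB_scan_eq (l : List Char) : ∀ (toks : List (List Char)) (buf : List Char),
    pvBFlush (l.foldl pvBStep (toks, buf))
      = toks ++ pvTok ((pvSq '\'' l).modifyHead (buf ++ ·)) := by
  induction l with
  | nil =>
    intro toks buf
    simp only [List.foldl_nil, pvBFlush, pvSq, List.modifyHead, pvTok]
    split_ifs with h <;> simp_all
  | cons c l ih =>
    intro toks buf
    by_cases hc : c = '\''
    · subst hc
      rw [List.foldl_cons]
      simp only [pvBStep, ne_eq, not_true_eq_false, if_neg, not_false_eq_true]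
      rw [ih]
      have h1 : (pvSq '\'' l).modifyHead (([] : List Char) ++ ·) = pvSq '\'' l := by
        cases pvSq '\'' l <;> simp [List.modifyHead]
      rw [h1]
      have h2 : pvSq '\'' ('\'' :: l) = [] :: pvSq '\'' l := by simp [pvSq]
      rw [h2]
      cases hsq : pvSq '\'' l with
      | nil => exact absurd hsq (pvSq_ne_nil _ _)
      | cons a t =>
        have htok : pvTok (buf :: a :: t)
            = (if buf ≠ [] then ['\'' :: buf ++ ['\'']] else []) ++ ['"', '\'', '"'] :: pvTok (a :: t) := rfl
        simp only [List.modifyHead, List.append_nil]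
        rw [htok]
        split_ifs <;> simp_all
    · rw [List.foldl_cons]
      simp only [pvBStep, ne_eq, hc, not_false_eq_true, if_pos]
      rw [ih]
      cases hsq : pvSq '\'' l with
      | nil => exact absurd hsq (pvSq_ne_nil '\'' l)
      | cons a t =>
        simp [pvSq, if_neg hc, hsq, List.modifyHead]

-- ===== VERDICT (by name: the statement is the Claim_ definition above) =====
theorem quote_xpath_literal_py_spec : Claim_equal_quote_xpath_literal_py := by
  intro value _
  unfold Spec_quote_xpath_literal_py quote_xpath_literal_py quote_xpath_literal_py_alt
  split_ifs with h1 h2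
  · rfl
  · rfl
  · have hA : (PySem.List.enumerate (PySem.Chars.splitOn value.toList ['\'']) 0).foldl
        (pvAStep (((PySem.Chars.splitOn value.toList ['\'']).length : Int) - 1)) []
        = pvTok (pvSq '\'' value.toList) := by
      rw [pvSplitOn_single]
      rw [pvA_loop_eq]
      have := pvTokList_eq_pvTok (pvSq '\'' value.toList) 0
      simpa using this
    have hB : pvBFlush (value.toList.foldl pvBStep ([], []))
        = pvTok (pvSq '\'' value.toList) := by
      rw [pvB_scan_eq]
      have h1 : (pvSq '\'' value.toList).modifyHead (([] : List Char) ++ ·)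
          = pvSq '\'' value.toList := by
        cases pvSq '\'' value.toList <;> simp [List.modifyHead]
      rw [h1]
      simp
    simp only [hA, hB]
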